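-- pv_equiv track=rewrite | github.com/l1kaa/Group-50-V.2 | Day 196/homework/main.py | check_employee
-- ===== SOURCE A (Python) =====
-- def check_employee(required, forbidden, candidate):
--     res = None
--     for i in candidate:
--         if i in required:
--             res = True
--         elif i in forbidden:
--             res = False
--     return res
-- ===== SOURCE B (Python) =====
-- def check_employee(required, forbidden, candidate):
--     for i in reversed(list(candidate)):
--         if i in required:
--             return True
--         if i in forbidden:
--             return False
--     return None
-- ===== Notes on version B (the rewrite author's own statement) =====
-- stated objective: faster
-- what changed: B scans the candidate in reverse and returns at the first required/forbidden match (only the last matching element determines the result), instead of A's forward scan that overwrites an accumulator over the whole list.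
import Mathlib
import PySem

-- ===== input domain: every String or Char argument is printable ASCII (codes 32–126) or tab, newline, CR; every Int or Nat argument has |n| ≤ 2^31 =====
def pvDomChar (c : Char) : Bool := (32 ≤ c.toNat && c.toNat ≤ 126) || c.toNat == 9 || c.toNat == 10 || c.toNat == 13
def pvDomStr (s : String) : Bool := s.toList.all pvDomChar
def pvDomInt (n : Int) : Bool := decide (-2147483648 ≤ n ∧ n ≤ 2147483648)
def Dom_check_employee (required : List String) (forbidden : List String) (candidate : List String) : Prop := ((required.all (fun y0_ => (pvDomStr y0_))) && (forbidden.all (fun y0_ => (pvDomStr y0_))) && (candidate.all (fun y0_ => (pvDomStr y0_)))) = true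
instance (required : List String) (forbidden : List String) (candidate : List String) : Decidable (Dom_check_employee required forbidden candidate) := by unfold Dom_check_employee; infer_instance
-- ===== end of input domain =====

-- B scans the candidate in reverse and returns at the first required/forbidden match
-- (only the last matching element matters), replacing A's forward accumulator loop; objective: simpler.

-- ===== PORT A =====
-- for i in candidate: res = True if i in required, else False if i in forbidden
def check_employee (required : List String) (forbidden : List String) (candidate : List String) : Option Bool :=
  candidate.foldl (fun res i =>
    if required.contains i then some true
    else if forbidden.contains i then some false
    else res) none

-- ===== PORT B =====
-- early-returning scan over the reversed candidate list
def check_employee_alt_go (required : List String) (forbidden : List String) : List String → Option Bool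
  | [] => none
  | i :: rest =>
    if required.contains i then some true
    else if forbidden.contains i then some false
    else check_employee_alt_go required forbidden rest

def check_employee_alt (required : List String) (forbidden : List String) (candidate : List String) : Option Bool :=
  check_employee_alt_go required forbidden candidate.reverse

-- ===== PRECONDITION & SPEC =====
def Spec_check_employee (required : List String) (forbidden : List String) (candidate : List String) (out : Option Bool) : Prop := out = check_employee_alt required forbidden candidate
instance (required : List String) (forbidden : List String) (candidate : List String) (out : Option Bool) : Decidable (Spec_check_employee required forbidden candidate out) := by unfold Spec_check_employee; infer_instance

-- ===== CLAIM (what is proved, stated in full; the proofs are below) =====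
def Claim_equal_check_employee : Prop := ∀ (required : List String) (forbidden : List String) (candidate : List String), Dom_check_employee required forbidden candidate → Spec_check_employee required forbidden candidate (check_employee required forbidden candidate)

-- ===== LEMMAS AND PROOFS =====
theorem alt_go_append (required forbidden : List String) (l1 l2 : List String) :
    check_employee_alt_go required forbidden (l1 ++ l2) =
      match check_employee_alt_go required forbidden l1 with
      | some b => some b
      | none => check_employee_alt_go required forbidden l2 := by
  induction l1 with
  | nil => simp [check_employee_alt_go]
  | cons i rest ih =>
    simp only [List.cons_append, check_employee_alt_go]
    split_ifs <;> simp [ih]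

-- foldl with initial accumulator res equals the reverse scan with fallback res
theorem fold_eq_rev (required forbidden : List String) (candidate : List String) (res : Option Bool) :
    candidate.foldl (fun res i =>
      if required.contains i then some true
      else if forbidden.contains i then some false
      else res) res =
    match check_employee_alt_go required forbidden candidate.reverse with
    | some b => some b
    | none => res := by
  induction candidate generalizing res with
  | nil => simp [check_employee_alt_go]
  | cons i rest ih =>
    simp only [List.foldl_cons, List.reverse_cons, alt_go_append, ih]
    cases h : check_employee_alt_go required forbidden rest.reverse <;>
      simp [check_employee_alt_go] <;> split_ifs <;> rfl

-- ===== VERDICT (by name: the statement is the Claim_ definition above) =====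
theorem check_employee_spec : Claim_equal_check_employee := by
  intro required forbidden candidate _
  unfold Spec_check_employee check_employee check_employee_alt
  rw [fold_eq_rev]
  cases h : check_employee_alt_go required forbidden candidate.reverse <;> simp
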